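-- pv_equiv track=rewrite | github.com/amanshaikh-ui/Netcast | src/linksearch/classification.py | missing_platform_reasons
-- ===== SOURCE A (Python) =====
-- LABEL_TO_SLUG = {
--     "Youtube": "youtube",
--     "YoutubeShorts": "youtube_shorts",
--     "Reddit": "reddit",
--     "Tiktok": "tiktok",
--     "Instagram": "instagram",
--     "Facebook": "facebook",
-- }
--
-- ORDER = ("Youtube", "YoutubeShorts", "Reddit", "Tiktok", "Instagram", "Facebook")
--
-- def missing_platform_reasons(
--     found_labels: set[str],
--     requested_labels: set[str],
--     coverage: dict[str, str],
--     archetype: str,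
--     cap_by_label: dict[str, int],
-- ) -> dict[str, str]:
--     """Short reasons keyed by slug (e.g. instagram) for requested-but-empty platforms."""
--     missing = requested_labels - found_labels
--     out: dict[str, str] = {}
--     for lab in ORDER:
--         if lab not in missing:
--             continue
--         slug = LABEL_TO_SLUG[lab]
--         if cap_by_label.get(lab, 0) <= 0:
--             out[slug] = "crawl skipped (low predicted yield for this product)"
--             continue
--         li = coverage.get(lab, "medium")
--         if lab == "Facebook":
--             out[slug] = (
--                 "weak discoverability"
--                 if li != "low"
--                 else "low public coverage"
--             )
--         elif lab in ("Tiktok", "Instagram"):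
--             out[slug] = "low public coverage" if li == "low" else "weak text match vs thumbnail-heavy posts"
--         elif lab == "Reddit":
--             out[slug] = "subreddit timing / niche posts" if li != "low" else "low public coverage"
--         elif lab in ("Youtube", "YoutubeShorts"):
--             out[slug] = "thin descriptions or niche uploads" if li != "low" else "low public coverage"
--         else:
--             out[slug] = "low public coverage"
--         if archetype == "social_heavy" and lab == "Facebook":
--             out[slug] = "weak discoverability"
--     return out
-- ===== SOURCE B (Python) =====
-- LABEL_TO_SLUG = {
--     "Youtube": "youtube",
--     "YoutubeShorts": "youtube_shorts",
--     "Reddit": "reddit",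
--     "Tiktok": "tiktok",
--     "Instagram": "instagram",
--     "Facebook": "facebook",
-- }
--
-- ORDER = ("Youtube", "YoutubeShorts", "Reddit", "Tiktok", "Instagram", "Facebook")
--
-- # default wording per platform when coverage is not "low"
-- HI_REASON = {
--     "Youtube": "thin descriptions or niche uploads",
--     "YoutubeShorts": "thin descriptions or niche uploads",
--     "Reddit": "subreddit timing / niche posts",
--     "Tiktok": "weak text match vs thumbnail-heavy posts",
--     "Instagram": "weak text match vs thumbnail-heavy posts",
--     "Facebook": "weak discoverability",
-- }
--
--
-- def missing_platform_reasons(found_labels, requested_labels, coverage, archetype, cap_by_label):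
--     # staged construction: one default map, then three whole-map override passes
--     # in increasing priority (low coverage < social_heavy Facebook < crawl cap).
--     missing = [lab for lab in ORDER if lab in requested_labels and lab not in found_labels]
--     out = {LABEL_TO_SLUG[lab]: HI_REASON[lab] for lab in missing}
--     for lab in missing:
--         if coverage.get(lab, "medium") == "low":
--             out[LABEL_TO_SLUG[lab]] = "low public coverage"
--     if archetype == "social_heavy" and "Facebook" in missing:
--         out["facebook"] = "weak discoverability"
--     for lab in missing:
--         if cap_by_label.get(lab, 0) <= 0:
--             out[LABEL_TO_SLUG[lab]] = "crawl skipped (low predicted yield for this product)"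
--     return out
-- ===== Notes on version B (the rewrite author's own statement) =====
-- stated objective: alternative
-- what changed: A decides each platform's final reason inside one loop via a per-label if/elif cascade plus a post-hoc Facebook override; B instead builds the full default-wording map in one comprehension and then applies three whole-map override passes in increasing priority (low coverage, social_heavy Facebook, crawl cap), so no branch cascade exists and each rule is a separate pass.
import Mathlib
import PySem

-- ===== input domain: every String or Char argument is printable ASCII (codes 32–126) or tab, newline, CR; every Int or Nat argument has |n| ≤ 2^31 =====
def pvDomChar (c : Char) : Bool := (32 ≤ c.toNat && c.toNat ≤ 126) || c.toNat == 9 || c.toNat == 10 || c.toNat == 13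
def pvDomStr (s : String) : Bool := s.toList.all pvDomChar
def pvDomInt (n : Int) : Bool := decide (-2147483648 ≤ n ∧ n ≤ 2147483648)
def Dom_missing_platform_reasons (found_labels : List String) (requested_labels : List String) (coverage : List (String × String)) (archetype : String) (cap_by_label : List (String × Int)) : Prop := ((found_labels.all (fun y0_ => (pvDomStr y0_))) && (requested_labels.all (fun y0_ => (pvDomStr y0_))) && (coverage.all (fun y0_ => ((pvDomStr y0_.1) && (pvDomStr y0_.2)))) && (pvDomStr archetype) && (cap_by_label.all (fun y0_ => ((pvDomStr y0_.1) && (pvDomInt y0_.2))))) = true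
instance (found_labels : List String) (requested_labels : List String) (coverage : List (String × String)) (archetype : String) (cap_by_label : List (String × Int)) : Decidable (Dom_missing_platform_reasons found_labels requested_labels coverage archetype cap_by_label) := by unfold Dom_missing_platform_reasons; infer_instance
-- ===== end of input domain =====

-- B replaces A's single loop with per-label if/elif cascade and post-hoc Facebook override by a
-- staged construction: one default map then three whole-map override passes; objective: alternative.

-- ===== PORT A =====
-- LABEL_TO_SLUG (module constant)
def mprLabelToSlug : PySem.Dict String String := PySem.Dict.ofList
  [("Youtube", "youtube"), ("YoutubeShorts", "youtube_shorts"), ("Reddit", "reddit"),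
   ("Tiktok", "tiktok"), ("Instagram", "instagram"), ("Facebook", "facebook")]

-- ORDER (module constant)
def mprOrder : List String := ["Youtube", "YoutubeShorts", "Reddit", "Tiktok", "Instagram", "Facebook"]

-- literal transliteration of A; LABEL_TO_SLUG[lab] never raises (every lab of ORDER is a key),
-- so the '.getD ""' default is unreachable.
def missing_platform_reasons (found_labels : List String) (requested_labels : List String) (coverage : List (String × String)) (archetype : String) (cap_by_label : List (String × Int)) : List (String × String) :=
  let missing := PySem.Set.diff requested_labels found_labels
  let covD := PySem.Dict.ofList coverage
  let capD := PySem.Dict.ofList cap_by_label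
  (mprOrder.foldl (fun out lab =>
    if !(PySem.Set.contains missing lab) then out
    else
      let slug := (mprLabelToSlug.get? lab).getD ""
      if capD.getD lab 0 ≤ 0 then
        out.insert slug "crawl skipped (low predicted yield for this product)"
      else
        let li := covD.getD lab "medium"
        let out :=
          if lab == "Facebook" then
            out.insert slug (if li != "low" then "weak discoverability" else "low public coverage")
          else if lab == "Tiktok" || lab == "Instagram" then
            out.insert slug (if li == "low" then "low public coverage" else "weak text match vs thumbnail-heavy posts")
          else if lab == "Reddit" then
            out.insert slug (if li != "low" then "subreddit timing / niche posts" else "low public coverage")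
          else if lab == "Youtube" || lab == "YoutubeShorts" then
            out.insert slug (if li != "low" then "thin descriptions or niche uploads" else "low public coverage")
          else
            out.insert slug "low public coverage"
        if archetype == "social_heavy" && lab == "Facebook" then
          out.insert slug "weak discoverability"
        else out) PySem.Dict.empty).items

-- ===== PORT B =====
def mprSlugB : PySem.Dict String String := PySem.Dict.ofList
  [("Youtube", "youtube"), ("YoutubeShorts", "youtube_shorts"), ("Reddit", "reddit"),
   ("Tiktok", "tiktok"), ("Instagram", "instagram"), ("Facebook", "facebook")]

def mprOrderB : List String := ["Youtube", "YoutubeShorts", "Reddit", "Tiktok", "Instagram", "Facebook"]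

-- HI_REASON: default wording per platform when coverage is not "low"
def mprHi : PySem.Dict String String := PySem.Dict.ofList
  [("Youtube", "thin descriptions or niche uploads"),
   ("YoutubeShorts", "thin descriptions or niche uploads"),
   ("Reddit", "subreddit timing / niche posts"),
   ("Tiktok", "weak text match vs thumbnail-heavy posts"),
   ("Instagram", "weak text match vs thumbnail-heavy posts"),
   ("Facebook", "weak discoverability")]

-- staged construction, following Source B: default map, then three override passes
-- (HI_REASON[lab] / LABEL_TO_SLUG[lab] never raise on labels of ORDER, defaults unreachable)
def missing_platform_reasons_alt (found_labels : List String) (requested_labels : List String) (coverage : List (String × String)) (archetype : String) (cap_by_label : List (String × Int)) : List (String × String) :=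
  let missing := mprOrderB.filter (fun lab => requested_labels.contains lab && !(found_labels.contains lab))
  let covD := PySem.Dict.ofList coverage
  let capD := PySem.Dict.ofList cap_by_label
  let out := missing.foldl (fun d lab =>
    d.insert ((mprSlugB.get? lab).getD "") ((mprHi.get? lab).getD "")) PySem.Dict.empty
  let out := missing.foldl (fun d lab =>
    if covD.getD lab "medium" == "low" then
      d.insert ((mprSlugB.get? lab).getD "") "low public coverage"
    else d) out
  let out := if archetype == "social_heavy" && missing.contains "Facebook" then
      out.insert "facebook" "weak discoverability"
    else out
  let out := missing.foldl (fun d lab =>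
    if capD.getD lab 0 ≤ 0 then
      d.insert ((mprSlugB.get? lab).getD "") "crawl skipped (low predicted yield for this product)"
    else d) out
  out.items

-- ===== PRECONDITION & SPEC =====
def Spec_missing_platform_reasons (found_labels : List String) (requested_labels : List String) (coverage : List (String × String)) (archetype : String) (cap_by_label : List (String × Int)) (out : List (String × String)) : Prop := out = missing_platform_reasons_alt found_labels requested_labels coverage archetype cap_by_label
instance (found_labels : List String) (requested_labels : List String) (coverage : List (String × String)) (archetype : String) (cap_by_label : List (String × Int)) (out : List (String × String)) : Decidable (Spec_missing_platform_reasons found_labels requested_labels coverage archetype cap_by_label out) := by unfold Spec_missing_platform_reasons; infer_instance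

-- ===== CLAIM (what is proved, stated in full; the proofs are below) =====
def Claim_equal_missing_platform_reasons : Prop := ∀ (found_labels : List String) (requested_labels : List String) (coverage : List (String × String)) (archetype : String) (cap_by_label : List (String × Int)), Dom_missing_platform_reasons found_labels requested_labels coverage archetype cap_by_label → Spec_missing_platform_reasons found_labels requested_labels coverage archetype cap_by_label (missing_platform_reasons found_labels requested_labels coverage archetype cap_by_label)

-- ===== LEMMAS AND PROOFS =====

-- the normal-form reason: what A computes for one missing label (cap, then social override, then coverage)
def mprReason (lab : String) (coverage : List (String × String)) (archetype : String) (cap_by_label : List (String × Int)) : String :=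
  if (PySem.Dict.ofList cap_by_label).getD lab 0 ≤ 0 then
    "crawl skipped (low predicted yield for this product)"
  else if archetype == "social_heavy" && lab == "Facebook" then
    "weak discoverability"
  else if (PySem.Dict.ofList coverage).getD lab "medium" == "low" then
    "low public coverage"
  else (mprHi.get? lab).getD ""

-- the membership test of A ('lab in requested - found') equals B's pair of list tests
lemma mpr_contains_diff (r f : List String) (x : String) :
    PySem.Set.contains (PySem.Set.diff r f) x = (r.contains x && !(f.contains x)) := by
  by_cases hx : x ∈ PySem.Set.diff r f
  · have hmem := (PySem.Set.mem_diff r f x).1 hx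
    simp_all [(PySem.Set.contains_iff _ _).2 hx, List.contains_eq_mem, hmem.1, hmem.2]
  · have hc : PySem.Set.contains (PySem.Set.diff r f) x = false := by
      by_contra h
      exact hx ((PySem.Set.contains_iff _ _).1 (by revert h; cases PySem.Set.contains (PySem.Set.diff r f) x <;> simp))
    rw [hc]
    by_cases h1 : x ∈ r <;> by_cases h3 : x ∈ f <;>
      simp_all [List.contains_eq_mem, PySem.Set.mem_diff]

lemma mpr_step_Youtube (coverage : List (String × String)) (archetype : String)
    (cap_by_label : List (String × Int)) (missing : List String)
    (out : PySem.Dict String String) :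
    (if !(PySem.Set.contains missing "Youtube") then out
     else
      let slug := (mprLabelToSlug.get? "Youtube").getD ""
      if (PySem.Dict.ofList cap_by_label).getD "Youtube" 0 ≤ 0 then
        out.insert slug "crawl skipped (low predicted yield for this product)"
      else
        let li := (PySem.Dict.ofList coverage).getD "Youtube" "medium"
        let out' :=
          if "Youtube" == "Facebook" then
            out.insert slug (if li != "low" then "weak discoverability" else "low public coverage")
          else if "Youtube" == "Tiktok" || "Youtube" == "Instagram" then
            out.insert slug (if li == "low" then "low public coverage" else "weak text match vs thumbnail-heavy posts")
          else if "Youtube" == "Reddit" then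
            out.insert slug (if li != "low" then "subreddit timing / niche posts" else "low public coverage")
          else if "Youtube" == "Youtube" || "Youtube" == "YoutubeShorts" then
            out.insert slug (if li != "low" then "thin descriptions or niche uploads" else "low public coverage")
          else
            out.insert slug "low public coverage"
        if archetype == "social_heavy" && "Youtube" == "Facebook" then
          out'.insert slug "weak discoverability"
        else out') =
    (if PySem.Set.contains missing "Youtube" then
      out.insert ((mprSlugB.get? "Youtube").getD "") (mprReason "Youtube" coverage archetype cap_by_label)
     else out) := by
  cases hm : PySem.Set.contains missing "Youtube" <;>
    simp [mprReason, hm,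
      show (mprLabelToSlug.get? "Youtube").getD "" = "youtube" from rfl,
      show (mprSlugB.get? "Youtube").getD "" = "youtube" from rfl,
      show (mprHi.get? "Youtube").getD "" = "thin descriptions or niche uploads" from rfl] <;>
    split_ifs <;>
      simp_all [PySem.Dict.insert_insert_self]

lemma mpr_step_YoutubeShorts (coverage : List (String × String)) (archetype : String)
    (cap_by_label : List (String × Int)) (missing : List String)
    (out : PySem.Dict String String) :
    (if !(PySem.Set.contains missing "YoutubeShorts") then out
     else
      let slug := (mprLabelToSlug.get? "YoutubeShorts").getD ""
      if (PySem.Dict.ofList cap_by_label).getD "YoutubeShorts" 0 ≤ 0 then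
        out.insert slug "crawl skipped (low predicted yield for this product)"
      else
        let li := (PySem.Dict.ofList coverage).getD "YoutubeShorts" "medium"
        let out' :=
          if "YoutubeShorts" == "Facebook" then
            out.insert slug (if li != "low" then "weak discoverability" else "low public coverage")
          else if "YoutubeShorts" == "Tiktok" || "YoutubeShorts" == "Instagram" then
            out.insert slug (if li == "low" then "low public coverage" else "weak text match vs thumbnail-heavy posts")
          else if "YoutubeShorts" == "Reddit" then
            out.insert slug (if li != "low" then "subreddit timing / niche posts" else "low public coverage")
          else if "YoutubeShorts" == "Youtube" || "YoutubeShorts" == "YoutubeShorts" then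
            out.insert slug (if li != "low" then "thin descriptions or niche uploads" else "low public coverage")
          else
            out.insert slug "low public coverage"
        if archetype == "social_heavy" && "YoutubeShorts" == "Facebook" then
          out'.insert slug "weak discoverability"
        else out') =
    (if PySem.Set.contains missing "YoutubeShorts" then
      out.insert ((mprSlugB.get? "YoutubeShorts").getD "") (mprReason "YoutubeShorts" coverage archetype cap_by_label)
     else out) := by
  cases hm : PySem.Set.contains missing "YoutubeShorts" <;>
    simp [mprReason, hm,
      show (mprLabelToSlug.get? "YoutubeShorts").getD "" = "youtube_shorts" from rfl,
      show (mprSlugB.get? "YoutubeShorts").getD "" = "youtube_shorts" from rfl,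
      show (mprHi.get? "YoutubeShorts").getD "" = "thin descriptions or niche uploads" from rfl] <;>
    split_ifs <;>
      simp_all [PySem.Dict.insert_insert_self]

lemma mpr_step_Reddit (coverage : List (String × String)) (archetype : String)
    (cap_by_label : List (String × Int)) (missing : List String)
    (out : PySem.Dict String String) :
    (if !(PySem.Set.contains missing "Reddit") then out
     else
      let slug := (mprLabelToSlug.get? "Reddit").getD ""
      if (PySem.Dict.ofList cap_by_label).getD "Reddit" 0 ≤ 0 then
        out.insert slug "crawl skipped (low predicted yield for this product)"
      else
        let li := (PySem.Dict.ofList coverage).getD "Reddit" "medium"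
        let out' :=
          if "Reddit" == "Facebook" then
            out.insert slug (if li != "low" then "weak discoverability" else "low public coverage")
          else if "Reddit" == "Tiktok" || "Reddit" == "Instagram" then
            out.insert slug (if li == "low" then "low public coverage" else "weak text match vs thumbnail-heavy posts")
          else if "Reddit" == "Reddit" then
            out.insert slug (if li != "low" then "subreddit timing / niche posts" else "low public coverage")
          else if "Reddit" == "Youtube" || "Reddit" == "YoutubeShorts" then
            out.insert slug (if li != "low" then "thin descriptions or niche uploads" else "low public coverage")
          else
            out.insert slug "low public coverage"
        if archetype == "social_heavy" && "Reddit" == "Facebook" then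
          out'.insert slug "weak discoverability"
        else out') =
    (if PySem.Set.contains missing "Reddit" then
      out.insert ((mprSlugB.get? "Reddit").getD "") (mprReason "Reddit" coverage archetype cap_by_label)
     else out) := by
  cases hm : PySem.Set.contains missing "Reddit" <;>
    simp [mprReason, hm,
      show (mprLabelToSlug.get? "Reddit").getD "" = "reddit" from rfl,
      show (mprSlugB.get? "Reddit").getD "" = "reddit" from rfl,
      show (mprHi.get? "Reddit").getD "" = "subreddit timing / niche posts" from rfl] <;>
    split_ifs <;>
      simp_all [PySem.Dict.insert_insert_self]

lemma mpr_step_Tiktok (coverage : List (String × String)) (archetype : String)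
    (cap_by_label : List (String × Int)) (missing : List String)
    (out : PySem.Dict String String) :
    (if !(PySem.Set.contains missing "Tiktok") then out
     else
      let slug := (mprLabelToSlug.get? "Tiktok").getD ""
      if (PySem.Dict.ofList cap_by_label).getD "Tiktok" 0 ≤ 0 then
        out.insert slug "crawl skipped (low predicted yield for this product)"
      else
        let li := (PySem.Dict.ofList coverage).getD "Tiktok" "medium"
        let out' :=
          if "Tiktok" == "Facebook" then
            out.insert slug (if li != "low" then "weak discoverability" else "low public coverage")
          else if "Tiktok" == "Tiktok" || "Tiktok" == "Instagram" then
            out.insert slug (if li == "low" then "low public coverage" else "weak text match vs thumbnail-heavy posts")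
          else if "Tiktok" == "Reddit" then
            out.insert slug (if li != "low" then "subreddit timing / niche posts" else "low public coverage")
          else if "Tiktok" == "Youtube" || "Tiktok" == "YoutubeShorts" then
            out.insert slug (if li != "low" then "thin descriptions or niche uploads" else "low public coverage")
          else
            out.insert slug "low public coverage"
        if archetype == "social_heavy" && "Tiktok" == "Facebook" then
          out'.insert slug "weak discoverability"
        else out') =
    (if PySem.Set.contains missing "Tiktok" then
      out.insert ((mprSlugB.get? "Tiktok").getD "") (mprReason "Tiktok" coverage archetype cap_by_label)
     else out) := by
  cases hm : PySem.Set.contains missing "Tiktok" <;>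
    simp [mprReason, hm,
      show (mprLabelToSlug.get? "Tiktok").getD "" = "tiktok" from rfl,
      show (mprSlugB.get? "Tiktok").getD "" = "tiktok" from rfl,
      show (mprHi.get? "Tiktok").getD "" = "weak text match vs thumbnail-heavy posts" from rfl] <;>
    split_ifs <;>
      simp_all [PySem.Dict.insert_insert_self]

lemma mpr_step_Instagram (coverage : List (String × String)) (archetype : String)
    (cap_by_label : List (String × Int)) (missing : List String)
    (out : PySem.Dict String String) :
    (if !(PySem.Set.contains missing "Instagram") then out
     else
      let slug := (mprLabelToSlug.get? "Instagram").getD ""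
      if (PySem.Dict.ofList cap_by_label).getD "Instagram" 0 ≤ 0 then
        out.insert slug "crawl skipped (low predicted yield for this product)"
      else
        let li := (PySem.Dict.ofList coverage).getD "Instagram" "medium"
        let out' :=
          if "Instagram" == "Facebook" then
            out.insert slug (if li != "low" then "weak discoverability" else "low public coverage")
          else if "Instagram" == "Tiktok" || "Instagram" == "Instagram" then
            out.insert slug (if li == "low" then "low public coverage" else "weak text match vs thumbnail-heavy posts")
          else if "Instagram" == "Reddit" then
            out.insert slug (if li != "low" then "subreddit timing / niche posts" else "low public coverage")
          else if "Instagram" == "Youtube" || "Instagram" == "YoutubeShorts" then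
            out.insert slug (if li != "low" then "thin descriptions or niche uploads" else "low public coverage")
          else
            out.insert slug "low public coverage"
        if archetype == "social_heavy" && "Instagram" == "Facebook" then
          out'.insert slug "weak discoverability"
        else out') =
    (if PySem.Set.contains missing "Instagram" then
      out.insert ((mprSlugB.get? "Instagram").getD "") (mprReason "Instagram" coverage archetype cap_by_label)
     else out) := by
  cases hm : PySem.Set.contains missing "Instagram" <;>
    simp [mprReason, hm,
      show (mprLabelToSlug.get? "Instagram").getD "" = "instagram" from rfl,
      show (mprSlugB.get? "Instagram").getD "" = "instagram" from rfl,
      show (mprHi.get? "Instagram").getD "" = "weak text match vs thumbnail-heavy posts" from rfl] <;>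
    split_ifs <;>
      simp_all [PySem.Dict.insert_insert_self]

lemma mpr_step_Facebook (coverage : List (String × String)) (archetype : String)
    (cap_by_label : List (String × Int)) (missing : List String)
    (out : PySem.Dict String String) :
    (if !(PySem.Set.contains missing "Facebook") then out
     else
      let slug := (mprLabelToSlug.get? "Facebook").getD ""
      if (PySem.Dict.ofList cap_by_label).getD "Facebook" 0 ≤ 0 then
        out.insert slug "crawl skipped (low predicted yield for this product)"
      else
        let li := (PySem.Dict.ofList coverage).getD "Facebook" "medium"
        let out' :=
          if "Facebook" == "Facebook" then
            out.insert slug (if li != "low" then "weak discoverability" else "low public coverage")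
          else if "Facebook" == "Tiktok" || "Facebook" == "Instagram" then
            out.insert slug (if li == "low" then "low public coverage" else "weak text match vs thumbnail-heavy posts")
          else if "Facebook" == "Reddit" then
            out.insert slug (if li != "low" then "subreddit timing / niche posts" else "low public coverage")
          else if "Facebook" == "Youtube" || "Facebook" == "YoutubeShorts" then
            out.insert slug (if li != "low" then "thin descriptions or niche uploads" else "low public coverage")
          else
            out.insert slug "low public coverage"
        if archetype == "social_heavy" && "Facebook" == "Facebook" then
          out'.insert slug "weak discoverability"
        else out') =
    (if PySem.Set.contains missing "Facebook" then
      out.insert ((mprSlugB.get? "Facebook").getD "") (mprReason "Facebook" coverage archetype cap_by_label)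
     else out) := by
  cases hm : PySem.Set.contains missing "Facebook" <;>
    simp [mprReason, hm,
      show (mprLabelToSlug.get? "Facebook").getD "" = "facebook" from rfl,
      show (mprSlugB.get? "Facebook").getD "" = "facebook" from rfl,
      show (mprHi.get? "Facebook").getD "" = "weak discoverability" from rfl] <;>
    split_ifs <;>
      simp_all [PySem.Dict.insert_insert_self]

-- A's loop body, for a label of ORDER, is a single conditional fresh-key insert of the normal-form reason
lemma mpr_step_eq (coverage : List (String × String)) (archetype : String)
    (cap_by_label : List (String × Int)) (missing : List String)
    (out : PySem.Dict String String) (lab : String) (h : lab ∈ mprOrder) :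
    (if !(PySem.Set.contains missing lab) then out
     else
      let slug := (mprLabelToSlug.get? lab).getD ""
      if (PySem.Dict.ofList cap_by_label).getD lab 0 ≤ 0 then
        out.insert slug "crawl skipped (low predicted yield for this product)"
      else
        let li := (PySem.Dict.ofList coverage).getD lab "medium"
        let out' :=
          if lab == "Facebook" then
            out.insert slug (if li != "low" then "weak discoverability" else "low public coverage")
          else if lab == "Tiktok" || lab == "Instagram" then
            out.insert slug (if li == "low" then "low public coverage" else "weak text match vs thumbnail-heavy posts")
          else if lab == "Reddit" then
            out.insert slug (if li != "low" then "subreddit timing / niche posts" else "low public coverage")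
          else if lab == "Youtube" || lab == "YoutubeShorts" then
            out.insert slug (if li != "low" then "thin descriptions or niche uploads" else "low public coverage")
          else
            out.insert slug "low public coverage"
        if archetype == "social_heavy" && lab == "Facebook" then
          out'.insert slug "weak discoverability"
        else out') =
    (if PySem.Set.contains missing lab then
      out.insert ((mprSlugB.get? lab).getD "") (mprReason lab coverage archetype cap_by_label)
     else out) := by
  fin_cases h
  · exact mpr_step_Youtube coverage archetype cap_by_label missing out
  · exact mpr_step_YoutubeShorts coverage archetype cap_by_label missing out
  · exact mpr_step_Reddit coverage archetype cap_by_label missing out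
  · exact mpr_step_Tiktok coverage archetype cap_by_label missing out
  · exact mpr_step_Instagram coverage archetype cap_by_label missing out
  · exact mpr_step_Facebook coverage archetype cap_by_label missing out

-- A in normal form: the ordered missing labels mapped to (slug, normal-form reason)
lemma mpr_A_normal (found requested : List String) (coverage : List (String × String))
    (archetype : String) (cap : List (String × Int)) :
    missing_platform_reasons found requested coverage archetype cap =
      (mprOrderB.filter (fun lab => requested.contains lab && !(found.contains lab))).map
        (fun lab => ((mprSlugB.get? lab).getD "", mprReason lab coverage archetype cap)) := by
  have hA : missing_platform_reasons found requested coverage archetype cap =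
      (mprOrder.foldl (fun out lab =>
        (if !(PySem.Set.contains (PySem.Set.diff requested found) lab) then out
         else
          let slug := (mprLabelToSlug.get? lab).getD ""
          if (PySem.Dict.ofList cap).getD lab 0 ≤ 0 then
            out.insert slug "crawl skipped (low predicted yield for this product)"
          else
            let li := (PySem.Dict.ofList coverage).getD lab "medium"
            let out' :=
              if lab == "Facebook" then
                out.insert slug (if li != "low" then "weak discoverability" else "low public coverage")
              else if lab == "Tiktok" || lab == "Instagram" then
                out.insert slug (if li == "low" then "low public coverage" else "weak text match vs thumbnail-heavy posts")
              else if lab == "Reddit" then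
                out.insert slug (if li != "low" then "subreddit timing / niche posts" else "low public coverage")
              else if lab == "Youtube" || lab == "YoutubeShorts" then
                out.insert slug (if li != "low" then "thin descriptions or niche uploads" else "low public coverage")
              else
                out.insert slug "low public coverage"
            if archetype == "social_heavy" && lab == "Facebook" then
              out'.insert slug "weak discoverability"
            else out')) PySem.Dict.empty).items := rfl
  rw [hA]
  have hcong := PySem.List.foldl_congr_mem' mprOrder _
    (fun out lab =>
      if PySem.Set.contains (PySem.Set.diff requested found) lab then
        out.insert ((mprSlugB.get? lab).getD "") (mprReason lab coverage archetype cap)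
      else out)
    (PySem.Dict.empty : PySem.Dict String String)
    (fun lab hl out => mpr_step_eq coverage archetype cap (PySem.Set.diff requested found) out lab hl)
  refine Eq.trans (congrArg PySem.Dict.items hcong) ?_
  rw [PySem.List.foldl_if_eq_foldl_filter]
  rw [PySem.Dict.items_foldl_insert_fresh
    (mprOrder.filter (fun lab => PySem.Set.contains (PySem.Set.diff requested found) lab))
    (fun lab => (mprSlugB.get? lab).getD "")
    (fun lab => mprReason lab coverage archetype cap)
    PySem.Dict.empty
    (by intro a _; simp [PySem.Dict.contains_empty])
    (by
      have hsub : (mprOrder.filter (fun lab => PySem.Set.contains (PySem.Set.diff requested found) lab)).Sublist mprOrder :=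
        List.filter_sublist
      have : ((mprOrder.filter (fun lab => PySem.Set.contains (PySem.Set.diff requested found) lab)).map
          (fun lab => (mprSlugB.get? lab).getD "")).Sublist (mprOrder.map (fun lab => (mprSlugB.get? lab).getD "")) :=
        hsub.map _
      exact List.Nodup.sublist this (by decide))]
  have hfil : mprOrder.filter (fun lab => PySem.Set.contains (PySem.Set.diff requested found) lab) =
      mprOrderB.filter (fun lab => requested.contains lab && !(found.contains lab)) := by
    show mprOrder.filter _ = mprOrder.filter _
    exact List.filter_congr (fun x _ => mpr_contains_diff requested found x)
  rw [hfil]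
  simp [PySem.Dict.empty]

-- an overwrite pass: conditionally re-inserting already-present distinct keys rewrites values in place
lemma mpr_pass_items (K g V : String → String) (p : String → Bool) :
    ∀ (L : List String) (pre : List (String × String)) (d : PySem.Dict String String),
      d.items = pre ++ L.map (fun a => (K a, V a)) →
      (pre.map Prod.fst ++ L.map K).Nodup →
      (L.foldl (fun d a => if p a then d.insert (K a) (g a) else d) d).items
        = pre ++ L.map (fun a => (K a, if p a then g a else V a)) := by
  intro L
  induction L with
  | nil => intro pre d h _; simpa using h
  | cons a t ih =>
    intro pre d h hnd
    have hmem : (K a, V a) ∈ d.items := by rw [h]; simp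
    have hcontains : d.contains (K a) = true :=
      (PySem.Dict.contains_iff_mem_keys _ _).2 (PySem.Dict.mem_keys_of_mem_items _ hmem)
    have hnd' := List.nodup_append.mp hnd
    have hKa_pre : K a ∉ pre.map Prod.fst := fun hx => hnd'.2.2 _ hx (K a) (by simp) rfl
    have hKa_t : K a ∉ t.map K := by
      have := hnd'.2.1
      simp only [List.map_cons, List.nodup_cons] at this
      exact this.1
    have hd' : (if p a then d.insert (K a) (g a) else d).items =
        (pre ++ [(K a, if p a then g a else V a)]) ++ t.map (fun b => (K b, V b)) := by
      by_cases hp : p a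
      · rw [if_pos hp, if_pos hp,
          PySem.Dict.items_insert_of_contains _ _ hcontains, h]
        simp only [List.map_append, List.map_cons]
        have hpre : pre.map (fun q => if (q.1 == K a) = true then (K a, g a) else q) = pre := by
          refine Eq.trans (List.map_congr_left (g := id) (fun q hq => ?_)) (List.map_id pre)
          have hne : q.1 ≠ K a := fun e => hKa_pre (e ▸ List.mem_map_of_mem hq)
          simp [hne]
        have htl : (t.map fun b => (K b, V b)).map
            (fun q => if (q.1 == K a) = true then (K a, g a) else q) = t.map fun b => (K b, V b) := by
          refine Eq.trans (List.map_congr_left (g := id) (fun q hq => ?_)) (List.map_id _)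
          obtain ⟨b, hb, rfl⟩ := List.mem_map.mp hq
          have hne : K b ≠ K a := fun e => hKa_t (e ▸ List.mem_map_of_mem hb)
          simp [hne]
        rw [hpre, htl]
        simp
      · rw [if_neg hp, if_neg hp, h]; simp
    have hnd2 : ((pre ++ [(K a, if p a then g a else V a)]).map Prod.fst ++ t.map K).Nodup := by
      simpa [List.append_assoc] using hnd
    rw [List.foldl_cons]
    rw [ih (pre ++ [(K a, if p a then g a else V a)]) _ hd' hnd2]
    simp

-- the slugs of any sublist of ORDER are distinct
lemma mpr_nodup_filter (q : String → Bool) :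
    ((mprOrderB.filter q).map (fun lab => (mprSlugB.get? lab).getD "")).Nodup := by
  have hsub : (mprOrderB.filter q).Sublist mprOrderB := List.filter_sublist
  exact List.Nodup.sublist (hsub.map _) (by decide)

-- a label of ORDER whose slug is "facebook" is "Facebook"
lemma mpr_slug_facebook (lab : String) (h : lab ∈ mprOrderB) :
    ((mprSlugB.get? lab).getD "" == "facebook") = (lab == "Facebook") := by
  fin_cases h <;> decide

-- B in normal form: same list, values given by the three stacked overrides
lemma mpr_B_normal (found requested : List String) (coverage : List (String × String))
    (archetype : String) (cap : List (String × Int)) :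
    missing_platform_reasons_alt found requested coverage archetype cap =
      (mprOrderB.filter (fun lab => requested.contains lab && !(found.contains lab))).map
        (fun lab => ((mprSlugB.get? lab).getD "",
          if (PySem.Dict.ofList cap).getD lab 0 ≤ 0 then
            "crawl skipped (low predicted yield for this product)"
          else if (archetype == "social_heavy" &&
              (mprOrderB.filter (fun lab => requested.contains lab && !(found.contains lab))).contains "Facebook")
              && lab == "Facebook" then
            "weak discoverability"
          else if (PySem.Dict.ofList coverage).getD lab "medium" == "low" then
            "low public coverage"
          else (mprHi.get? lab).getD "")) := by
  set M := mprOrderB.filter (fun lab => requested.contains lab && !(found.contains lab)) with hM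
  set K : String → String := fun lab => (mprSlugB.get? lab).getD "" with hK
  set G : Bool := archetype == "social_heavy" && M.contains "Facebook" with hG
  -- pass 1: fresh inserts of the defaults
  have h1 : (M.foldl (fun d lab => d.insert (K lab) ((mprHi.get? lab).getD "")) PySem.Dict.empty).items
      = M.map (fun lab => (K lab, (mprHi.get? lab).getD "")) := by
    rw [PySem.Dict.items_foldl_insert_fresh M K (fun lab => (mprHi.get? lab).getD "")
      PySem.Dict.empty (by intro a _; simp [PySem.Dict.contains_empty]) (mpr_nodup_filter _)]
    simp [PySem.Dict.empty]
  -- pass 2: low-coverage override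
  have h2 := mpr_pass_items K (fun _ => "low public coverage") (fun lab => (mprHi.get? lab).getD "")
    (fun lab => (PySem.Dict.ofList coverage).getD lab "medium" == "low") M [] _
    (by simpa using h1) (by simpa using mpr_nodup_filter _)
  simp only [List.nil_append] at h2
  set d2 := M.foldl (fun d lab =>
    if (PySem.Dict.ofList coverage).getD lab "medium" == "low" then
      d.insert (K lab) "low public coverage" else d)
    (M.foldl (fun d lab => d.insert (K lab) ((mprHi.get? lab).getD "")) PySem.Dict.empty) with hd2
  set v2 : String → String := fun lab =>
    if (PySem.Dict.ofList coverage).getD lab "medium" == "low" then "low public coverage"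
    else (mprHi.get? lab).getD "" with hv2
  -- pass 3: the social_heavy Facebook override
  set v3 : String → String := fun lab => if G && lab == "Facebook" then "weak discoverability" else v2 lab with hv3
  have h3 : (if G then d2.insert "facebook" "weak discoverability" else d2).items
      = M.map (fun lab => (K lab, v3 lab)) := by
    by_cases hg : G = true
    · have hFB : "Facebook" ∈ M := by
        have := hg
        rw [hG, Bool.and_eq_true] at this
        exact List.contains_iff_mem.mp this.2
      have hmem : ("facebook", v2 "Facebook") ∈ d2.items := by
        rw [h2]
        exact List.mem_map.mpr ⟨"Facebook", hFB, rfl⟩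
      have hcont : d2.contains "facebook" = true :=
        (PySem.Dict.contains_iff_mem_keys _ _).2 (PySem.Dict.mem_keys_of_mem_items _ hmem)
      rw [if_pos hg, PySem.Dict.items_insert_of_contains _ _ hcont, h2, List.map_map]
      refine List.map_congr_left (fun lab hlab => ?_)
      have ho : lab ∈ mprOrderB := List.mem_of_mem_filter hlab
      simp only [Function.comp]
      rw [show ((K lab, v2 lab).1 == "facebook") = (lab == "Facebook") from mpr_slug_facebook lab ho]
      by_cases hfb : lab = "Facebook"
      · subst hfb
        refine Eq.trans (if_pos (by decide)) ?_
        exact Prod.ext rfl (by simp [hv3, hg])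
      · have hne : (lab == "Facebook") = false := by simpa using hfb
        refine Eq.trans (if_neg (by simp [hne])) ?_
        exact Prod.ext rfl (by simp [hv3, hv2, hfb])
    · have hg' : G = false := by revert hg; cases G <;> simp
      rw [if_neg (by rw [hg']; simp), h2]
      refine List.map_congr_left (fun lab hlab => ?_)
      simp only [hv3, hv2, hg', Bool.false_and, Bool.false_eq_true, if_false]
  -- pass 4: crawl-cap override
  have h4 := mpr_pass_items K (fun _ => "crawl skipped (low predicted yield for this product)") v3
    (fun lab => decide ((PySem.Dict.ofList cap).getD lab 0 ≤ 0)) M []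
    (if G then d2.insert "facebook" "weak discoverability" else d2)
    (by simpa using h3) (by simpa using mpr_nodup_filter _)
  simp only [List.nil_append] at h4
  show (M.foldl (fun d lab =>
      if (PySem.Dict.ofList cap).getD lab 0 ≤ 0 then
        d.insert (K lab) "crawl skipped (low predicted yield for this product)" else d)
      (if G then d2.insert "facebook" "weak discoverability" else d2)).items = _
  rw [show (fun (d : PySem.Dict String String) lab =>
      if (PySem.Dict.ofList cap).getD lab 0 ≤ 0 then
        d.insert (K lab) "crawl skipped (low predicted yield for this product)" else d)
    = (fun (d : PySem.Dict String String) lab =>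
      if decide ((PySem.Dict.ofList cap).getD lab 0 ≤ 0) = true then
        d.insert (K lab) "crawl skipped (low predicted yield for this product)" else d) from by
    funext d lab; simp]
  rw [h4]
  refine List.map_congr_left (fun lab hlab => ?_)
  simp only [hv3, hv2, hG, hK, decide_eq_true_eq]

-- ===== VERDICT (by name: the statement is the Claim_ definition above) =====
theorem missing_platform_reasons_spec : Claim_equal_missing_platform_reasons := by
  intro found requested coverage archetype cap _
  unfold Spec_missing_platform_reasons
  rw [mpr_A_normal, mpr_B_normal]
  refine List.map_congr_left (fun lab hlab => ?_)
  have ho : lab ∈ mprOrderB := List.mem_of_mem_filter hlab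
  congr 1
  unfold mprReason
  by_cases hfb : lab = "Facebook"
  · subst hfb
    have hcont : (mprOrderB.filter (fun lab => requested.contains lab && !(found.contains lab))).contains "Facebook" = true :=
      List.contains_iff_mem.mpr hlab
    simp only [hcont, Bool.and_true, beq_self_eq_true]
  · have hfb' : (lab == "Facebook") = false := by simpa using hfb
    simp only [hfb', Bool.and_false, Bool.false_eq_true, if_false]
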